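-- pv_equiv track=rewrite | github.com/Brayden-Zhang/ECE324-Mobility-Model-Project | src/route_rangers/cli/build_poi_mobility_sample.py | _select_city_res
-- ===== SOURCE A (Python) =====
-- from collections import Counter
-- from typing import Dict, Iterable, List, Optional, Sequence, Tuple
--
-- def _select_city_res(
--     start_cells_by_res: Dict[int, List[str]],
--     candidates: Iterable[int],
--     min_records: int,
--     min_cities: int,
-- ) -> int:
--     selected = None
--     for res in candidates:
--         cells = start_cells_by_res.get(res, [])
--         if not cells:
--             continue
--         counts = Counter(cells)
--         eligible = [k for k, v in counts.items() if v >= min_records]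
--         if len(eligible) >= min_cities:
--             return res
--         selected = res if selected is None else min(selected, res)
--     return selected if selected is not None else 2
-- ===== SOURCE B (Python) =====
-- def _select_city_res(
--     start_cells_by_res,
--     candidates,
--     min_records,
--     min_cities,
-- ):
--     # Stage 1: precompute, for every resolution in the table, whether it qualifies,
--     # counting eligible cells by sorting and scanning equal runs (run length = record count).
--     qualifies = {}
--     for res, cells in start_cells_by_res.items():
--         if not cells:
--             continue
--         s = sorted(cells)
--         n = len(s)
--         groups = 0
--         i = 0
--         while i < n:
--             j = i + 1
--             while j < n and s[j] == s[i]: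
--                 j += 1
--             if j - i >= min_records:
--                 groups += 1
--             i = j
--         qualifies[res] = groups >= min_cities
--     # Stage 2: one lookup pass over the candidates.
--     fallback = None
--     for res in candidates:
--         q = qualifies.get(res)
--         if q is None:
--             continue
--         if q:
--             return res
--         if fallback is None or res < fallback:
--             fallback = res
--     return 2 if fallback is None else fallback
-- ===== Notes on version B (the rewrite author's own statement) =====
-- stated objective: alternative
-- what changed: B splits the work into two stages: a precomputation pass over the whole table that decides each resolution's qualification once, counting eligible cells by sorting them and scanning equal runs (run length = record count) instead of building a Counter and filtering it, followed by a single lookup pass over the candidates with a smallest-so-far fallback.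
import Mathlib
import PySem

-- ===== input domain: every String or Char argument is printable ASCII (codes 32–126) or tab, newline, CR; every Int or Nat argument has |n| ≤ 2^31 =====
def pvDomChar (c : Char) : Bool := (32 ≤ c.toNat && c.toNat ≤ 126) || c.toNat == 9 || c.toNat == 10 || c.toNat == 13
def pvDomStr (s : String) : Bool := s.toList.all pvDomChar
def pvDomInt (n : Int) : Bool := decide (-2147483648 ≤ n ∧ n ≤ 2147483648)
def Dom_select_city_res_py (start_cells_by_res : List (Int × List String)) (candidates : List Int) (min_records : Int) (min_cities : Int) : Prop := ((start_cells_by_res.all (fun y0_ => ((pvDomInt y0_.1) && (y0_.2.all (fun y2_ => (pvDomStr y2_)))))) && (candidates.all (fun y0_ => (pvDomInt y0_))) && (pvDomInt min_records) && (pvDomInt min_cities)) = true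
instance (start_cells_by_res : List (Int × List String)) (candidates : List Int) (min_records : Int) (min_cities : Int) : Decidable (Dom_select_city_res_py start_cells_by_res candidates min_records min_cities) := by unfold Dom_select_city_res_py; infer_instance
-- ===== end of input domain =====

-- B replaces A's per-candidate Counter with (1) a precomputation pass over the whole table that
-- decides each resolution's qualification once, counting eligible cells by sorting and scanning
-- equal runs, and (2) a single lookup pass over the candidates; an alternative decomposition.

-- ===== PORT A =====
-- loop over candidates carrying 'selected : Option Int'
def goA_select_city_res (d : PySem.Dict Int (List String)) (min_records min_cities : Int) :
    List Int → Option Int → Int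
  | [], sel => match sel with
    | some s => s
    | none => 2
  | res :: rest, sel =>
    let cells := d.getD res []
    if cells = [] then goA_select_city_res d min_records min_cities rest sel
    else
      let counts := PySem.Dict.counter cells
      let eligible := (counts.items.filter (fun kv => decide (min_records ≤ kv.2))).map Prod.fst
      if min_cities ≤ (eligible.length : Int) then res
      else
        goA_select_city_res d min_records min_cities rest
          (match sel with
           | none => some res
           | some s => some (min s res))

def select_city_res_py (start_cells_by_res : List (Int × List String)) (candidates : List Int) (min_records : Int) (min_cities : Int) : Int :=
  goA_select_city_res (PySem.Dict.mk start_cells_by_res) min_records min_cities candidates none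

-- ===== PORT B =====
-- number of equal runs of length >= m in s: port of Source B's nested index while-loops, recursing
-- on one run (s[i..j-1], i.e. head plus takeWhile of equals) per outer iteration
def runGroupsB (m : Int) : List String → Int
  | [] => 0
  | c :: t =>
    (if m ≤ ((t.takeWhile (fun x => x == c)).length : Int) + 1 then 1 else 0) +
      runGroupsB m (t.dropWhile (fun x => x == c))
termination_by l => l.length
decreasing_by
  exact Nat.lt_succ_of_le (List.length_dropWhile_le _ _)

-- the effective item sequence of the dict parameter: first occurrence of each key wins
-- (exact for the PySem first-match dict model; a Python dict's .items() already has unique keys)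
def firstItemsB : List (Int × List String) → List (Int × List String)
  | [] => []
  | kv :: rest => kv :: firstItemsB (rest.filter (fun p => decide (p.1 ≠ kv.1)))
termination_by l => l.length
decreasing_by
  simp only [List.length_unattach, List.length_cons]
  exact Nat.lt_succ_of_le (le_trans (List.length_filter_le _ _) (by simp))

-- stage 1: qualifies[res] = (groups >= min_cities) for every res with non-empty cells
def buildQB (min_records min_cities : Int) (items : List (Int × List String)) :
    PySem.Dict Int Bool :=
  items.foldl
    (fun q kv =>
      if kv.2 = [] then q
      else q.insert kv.1
        (decide (min_cities ≤ runGroupsB min_records (PySem.List.sorted kv.2 (fun x => x)))))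
    PySem.Dict.empty

-- stage 2: one lookup pass over candidates carrying 'fallback : Option Int'
def goB_select_city_res (q : PySem.Dict Int Bool) : List Int → Option Int → Int
  | [], fb => match fb with
    | some s => s
    | none => 2
  | res :: rest, fb =>
    match q.get? res with
    | none => goB_select_city_res q rest fb
    | some b =>
      if b then res
      else goB_select_city_res q rest
        (match fb with
         | none => some res
         | some s => if res < s then some res else some s)

def select_city_res_py_alt (start_cells_by_res : List (Int × List String)) (candidates : List Int) (min_records : Int) (min_cities : Int) : Int :=
  goB_select_city_res (buildQB min_records min_cities (firstItemsB start_cells_by_res)) candidates none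

-- ===== PRECONDITION & SPEC =====
def Spec_select_city_res_py (start_cells_by_res : List (Int × List String)) (candidates : List Int) (min_records : Int) (min_cities : Int) (out : Int) : Prop := out = select_city_res_py_alt start_cells_by_res candidates min_records min_cities
instance (start_cells_by_res : List (Int × List String)) (candidates : List Int) (min_records : Int) (min_cities : Int) (out : Int) : Decidable (Spec_select_city_res_py start_cells_by_res candidates min_records min_cities out) := by unfold Spec_select_city_res_py; infer_instance

-- ===== CLAIM (what is proved, stated in full; the proofs are below) =====
def Claim_equal_select_city_res_py : Prop := ∀ (start_cells_by_res : List (Int × List String)) (candidates : List Int) (min_records : Int) (min_cities : Int), Dom_select_city_res_py start_cells_by_res candidates min_records min_cities → Spec_select_city_res_py start_cells_by_res candidates min_records min_cities (select_city_res_py start_cells_by_res candidates min_records min_cities)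

-- ===== LEMMAS AND PROOFS =====

-- the per-candidate eligible count computed by A, as a function
def eligLenA (min_records : Int) (cells : List String) : Int :=
  ((((PySem.Dict.counter cells).items.filter (fun kv => decide (min_records ≤ kv.2))).map
      Prod.fst).length : Int)

-- run counting on a ≤-sorted list counts the distinct values whose multiplicity meets m
theorem runGroupsB_sorted_le (m : Int) :
    ∀ (n : Nat) (s : List String), s.length ≤ n → s.Pairwise (· ≤ ·) →
    runGroupsB m s
      = (((PySem.Set.ofList s).filter
            (fun k => decide (m ≤ (s.count k : Int)))).length : Int) := by
  intro n
  induction n with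
  | zero =>
    intro s hlen _
    have : s = [] := List.eq_nil_of_length_eq_zero (Nat.le_zero.mp hlen)
    subst this
    simp [runGroupsB, PySem.Set.ofList]
  | succ n ih =>
    intro s hlen hp
    cases s with
    | nil => simp [runGroupsB, PySem.Set.ofList]
    | cons c t =>
      have hct : t.takeWhile (fun x => x == c) ++ t.dropWhile (fun x => x == c) = t :=
        List.takeWhile_append_dropWhile
      set a := t.takeWhile (fun x => x == c) with ha
      set r := t.dropWhile (fun x => x == c) with hr
      have ha_all : ∀ x ∈ a, x = c := by
        intro x hx
        rw [ha] at hx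
        exact eq_of_beq (List.mem_takeWhile_imp (p := fun x => x == c) hx)
      have hp_t : t.Pairwise (· ≤ ·) := hp.of_cons
      have hc_le : ∀ x ∈ t, c ≤ x := (List.pairwise_cons.mp hp).1
      have hr_sub : r.Sublist t := List.dropWhile_sublist _
      have hp_r : r.Pairwise (· ≤ ·) := hp_t.sublist hr_sub
      have hcr : c ∉ r := by
        intro hmem
        cases hre : r with
        | nil => rw [hre] at hmem; exact absurd hmem (List.not_mem_nil)
        | cons d r' =>
          have hdw : t.dropWhile (fun x => x == c) = d :: r' := hr.symm.trans hre
          have hd_ne : d ≠ c := by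
            have hbe := List.head_dropWhile_not (fun x => x == c) (l := t) (w := by simp [hdw])
            simpa [hdw] using hbe
          rw [hre] at hmem
          rcases List.mem_cons.mp hmem with h | h
          · exact hd_ne h.symm
          · -- d ≤ c from r's pairwise, c ≤ d from head pairwise ⇒ d = c, contradiction
            have hdc : d ≤ c := by
              rw [hre] at hp_r
              exact (List.pairwise_cons.mp hp_r).1 c h
            have hcd : c ≤ d := hc_le d (hr_sub.mem (by rw [hre]; exact List.mem_cons_self))
            exact hd_ne (le_antisymm hdc hcd)
      have hcount_c : (c :: t).count c = a.length + 1 := by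
        have hac : a.count c = a.length := List.count_eq_length.mpr (fun b hb => (ha_all b hb).symm)
        have hrc : r.count c = 0 := List.count_eq_zero.mpr hcr
        rw [List.count_cons_self, ← hct, List.count_append, hac, hrc]
      have hcount_k : ∀ k, k ≠ c → (c :: t).count k = r.count k := by
        intro k hk
        have hak : a.count k = 0 := by
          apply List.count_eq_zero.mpr
          intro hmem
          exact hk (ha_all k hmem)
        rw [List.count_cons_of_ne (Ne.symm hk), ← hct, List.count_append, hak, Nat.zero_add]
      -- ofList (c :: t) is a permutation of c :: ofList r
      have hperm : (PySem.Set.ofList (c :: t)).Perm (c :: PySem.Set.ofList r) := by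
        apply (List.perm_ext_iff_of_nodup (PySem.Set.nodup_ofList _) ?_).mpr
        · intro x
          simp only [PySem.Set.mem_ofList, List.mem_cons, ← hct, List.mem_append]
          constructor
          · rintro (h | h | h)
            · exact Or.inl h
            · exact Or.inl (ha_all x h)
            · exact Or.inr h
          · rintro (h | h)
            · exact Or.inl h
            · exact Or.inr (Or.inr h)
        · exact List.nodup_cons.mpr ⟨fun h => hcr ((PySem.Set.mem_ofList _ _).mp h),
            PySem.Set.nodup_ofList _⟩
      have hlen_r : r.length ≤ n := by
        have h1 := List.length_dropWhile_le (fun x => x == c) t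
        rw [hr]
        simp only [List.length_cons] at hlen
        omega
      have ihr := ih r hlen_r hp_r
      have hfilter_eq :
          ((PySem.Set.ofList r).filter (fun k => decide (m ≤ ((c :: t).count k : Int))))
            = ((PySem.Set.ofList r).filter (fun k => decide (m ≤ (r.count k : Int)))) := by
        apply List.filter_congr
        intro x hx
        have hx_r : x ∈ r := (PySem.Set.mem_ofList _ _).mp hx
        have hx_ne : x ≠ c := fun h => hcr (h ▸ hx_r)
        rw [hcount_k x hx_ne]
      calc runGroupsB m (c :: t)
          = (if m ≤ (a.length : Int) + 1 then 1 else 0) + runGroupsB m r := by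
            rw [runGroupsB]
        _ = (if m ≤ (a.length : Int) + 1 then 1 else 0)
              + (((PySem.Set.ofList r).filter
                    (fun k => decide (m ≤ (r.count k : Int)))).length : Int) := by rw [ihr]
        _ = (((PySem.Set.ofList (c :: t)).filter
                (fun k => decide (m ≤ ((c :: t).count k : Int)))).length : Int) := by
            rw [(hperm.filter _).length_eq, List.filter_cons, hfilter_eq, hcount_c]
            by_cases h : m ≤ (a.length : Int) + 1
            · have : decide (m ≤ ((a.length + 1 : Nat) : Int)) = true := by
                simp; push_cast; omega
              simp [h, this]
              push_cast
              ring
            · have : decide (m ≤ ((a.length + 1 : Nat) : Int)) = false := by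
                simp; push_cast; omega
              simp [h, this]

-- B's run count over sorted cells equals A's eligible-list length
theorem runGroupsB_eq_eligLenA (m : Int) (cells : List String) :
    runGroupsB m (PySem.List.sorted cells (fun x => x)) = eligLenA m cells := by
  set s := PySem.List.sorted cells (fun x => x) with hs
  have hperm : s.Perm cells := PySem.List.sorted_perm cells (fun x => x) false
  have hpw : s.Pairwise (· ≤ ·) := PySem.List.sorted_pairwise cells (fun x => x)
  rw [runGroupsB_sorted_le m s.length s le_rfl hpw]
  unfold eligLenA
  rw [PySem.Dict.items_counter, List.filter_map, List.length_map, List.length_map]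
  congr 1
  -- distinct lists with the same members, filtered by predicates equal on members
  have hofperm : (PySem.Set.ofList s).Perm (PySem.Set.ofList cells) := by
    apply (List.perm_ext_iff_of_nodup (PySem.Set.nodup_ofList _) (PySem.Set.nodup_ofList _)).mpr
    intro x
    rw [PySem.Set.mem_ofList, PySem.Set.mem_ofList]
    exact ⟨fun h => hperm.mem_iff.mp h, fun h => hperm.mem_iff.mpr h⟩
  have hpred : ∀ x ∈ PySem.Set.ofList s,
      decide (m ≤ (s.count x : Int))
        = ((fun kv => decide (m ≤ kv.2)) ∘ (fun k => (k, (cells.count k : Int)))) x := by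
    intro x _
    simp only [Function.comp]
    rw [hperm.count_eq]
  rw [List.filter_congr hpred]
  exact ((hofperm.filter _).length_eq)

-- fold of stage 1 leaves keys it never touches alone
theorem buildQB_get_untouched (m mc : Int) :
    ∀ (L : List (Int × List String)) (q0 : PySem.Dict Int Bool) (res : Int),
    res ∉ L.map Prod.fst →
    (L.foldl
      (fun q kv =>
        if kv.2 = [] then q
        else q.insert kv.1
          (decide (mc ≤ runGroupsB m (PySem.List.sorted kv.2 (fun x => x))))) q0).get? res
      = q0.get? res := by
  intro L
  induction L with
  | nil => intro q0 res _; rfl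
  | cons kv L ih =>
    intro q0 res hres
    simp only [List.map_cons, List.mem_cons, not_or] at hres
    simp only [List.foldl_cons]
    rw [ih _ _ hres.2]
    by_cases h : kv.2 = []
    · simp [h]
    · simp only [h, if_neg h]
      exact PySem.Dict.get?_insert_of_ne _ _ hres.1

-- lookup in the stage-1 dict, characterised via the first matching item
theorem buildQB_get (m mc : Int) :
    ∀ (L : List (Int × List String)) (q0 : PySem.Dict Int Bool) (res : Int),
    (L.map Prod.fst).Nodup →
    (L.foldl
      (fun q kv =>
        if kv.2 = [] then q
        else q.insert kv.1
          (decide (mc ≤ runGroupsB m (PySem.List.sorted kv.2 (fun x => x))))) q0).get? res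
      = match L.find? (fun kv => kv.1 == res) with
        | none => q0.get? res
        | some kv =>
          if kv.2 = [] then q0.get? res
          else some (decide (mc ≤ runGroupsB m (PySem.List.sorted kv.2 (fun x => x)))) := by
  intro L
  induction L with
  | nil => intro q0 res _; rfl
  | cons kv L ih =>
    intro q0 res hnd
    simp only [List.map_cons, List.nodup_cons] at hnd
    simp only [List.foldl_cons]
    by_cases hk : kv.1 = res
    · have hfind : (kv :: L).find? (fun p => p.1 == res) = some kv := by
        simp [List.find?_cons, hk]
      rw [hfind]
      have hres_not : res ∉ L.map Prod.fst := by rw [← hk]; exact hnd.1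
      rw [buildQB_get_untouched m mc L _ res hres_not]
      by_cases h : kv.2 = []
      · simp [h]
      · simp only [if_neg h]
        rw [hk]
        exact PySem.Dict.get?_insert_self _ _ _
    · have hfind : (kv :: L).find? (fun p => p.1 == res)
          = L.find? (fun p => p.1 == res) := by
        simp [List.find?_cons, hk]
      rw [hfind, ih _ res hnd.2]
      have hstep : (if kv.2 = [] then q0
          else q0.insert kv.1
            (decide (mc ≤ runGroupsB m (PySem.List.sorted kv.2 (fun x => x))))).get? res
          = q0.get? res := by
        by_cases h : kv.2 = []
        · simp [h]
        · simp only [if_neg h]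
          exact PySem.Dict.get?_insert_of_ne _ _ (fun he => hk he.symm)
      cases hf : L.find? (fun p => p.1 == res) with
      | none => simp [hstep]
      | some kv' =>
        by_cases h' : kv'.2 = [] <;> simp [h', hstep]

-- dropping pairs whose key differs from res's first match does not change that match
theorem find?_filter_ne (res key : Int) (hkey : key ≠ res) :
    ∀ (L : List (Int × List String)),
    (L.filter (fun p => decide (p.1 ≠ key))).find? (fun kv => kv.1 == res)
      = L.find? (fun kv => kv.1 == res) := by
  intro L
  induction L with
  | nil => rfl
  | cons p rest ih =>
    by_cases hp : p.1 = key
    · have h1 : (decide (p.1 ≠ key)) = false := by simp [hp]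
      have h2 : (p.1 == res) = false := by simp [hp, hkey]
      rw [List.filter_cons, h1]
      simp only [Bool.false_eq_true, if_false]
      rw [List.find?_cons, h2, ih]
    · have h1 : (decide (p.1 ≠ key)) = true := by simp [hp]
      rw [List.filter_cons, h1]
      simp only [if_true]
      rw [List.find?_cons, List.find?_cons]
      cases hpr : (p.1 == res) with
      | true => rfl
      | false => exact ih

-- firstItemsB preserves the first match for every key
theorem find?_firstItemsB (res : Int) :
    ∀ (n : Nat) (L : List (Int × List String)), L.length ≤ n →
    (firstItemsB L).find? (fun kv => kv.1 == res) = L.find? (fun kv => kv.1 == res) := by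
  intro n
  induction n with
  | zero =>
    intro L hlen
    have : L = [] := List.eq_nil_of_length_eq_zero (Nat.le_zero.mp hlen)
    subst this
    rw [firstItemsB]
  | succ n ih =>
    intro L hlen
    cases L with
    | nil => rw [firstItemsB]
    | cons kv rest =>
      rw [firstItemsB]
      by_cases hk : kv.1 = res
      · simp [List.find?_cons, hk]
      · have h1 : (kv.1 == res) = false := by simp [hk]
        rw [List.find?_cons, h1, List.find?_cons, h1]
        have hlenf : (rest.filter (fun p => decide (p.1 ≠ kv.1))).length ≤ n := by
          have := List.length_filter_le (fun p => decide (p.1 ≠ kv.1)) rest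
          simp only [List.length_cons] at hlen
          omega
        rw [ih _ hlenf, find?_filter_ne res kv.1 hk rest]

-- every element of firstItemsB comes from the original list
theorem mem_firstItemsB :
    ∀ (n : Nat) (M : List (Int × List String)), M.length ≤ n →
    ∀ x ∈ firstItemsB M, x ∈ M := by
  intro n
  induction n with
  | zero =>
    intro M hlen x hx
    have : M = [] := List.eq_nil_of_length_eq_zero (Nat.le_zero.mp hlen)
    subst this
    rw [firstItemsB] at hx
    exact absurd hx (List.not_mem_nil)
  | succ n ih =>
    intro M hlen x hx
    cases M with
    | nil =>
      rw [firstItemsB] at hx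
      exact absurd hx (List.not_mem_nil)
    | cons q M' =>
      rw [firstItemsB] at hx
      rcases List.mem_cons.mp hx with h | h
      · exact h ▸ List.mem_cons_self
      · have hl : (M'.filter (fun p => decide (p.1 ≠ q.1))).length ≤ n := by
          have := List.length_filter_le (fun p => decide (p.1 ≠ q.1)) M'
          simp only [List.length_cons] at hlen
          omega
        have := ih _ hl x h
        exact List.mem_cons.mpr (Or.inr (List.mem_of_mem_filter this))

-- firstItemsB's keys are distinct
theorem nodup_keys_firstItemsB :
    ∀ (n : Nat) (L : List (Int × List String)), L.length ≤ n →
    ((firstItemsB L).map Prod.fst).Nodup := by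
  intro n
  induction n with
  | zero =>
    intro L hlen
    have : L = [] := List.eq_nil_of_length_eq_zero (Nat.le_zero.mp hlen)
    subst this
    rw [firstItemsB]
    simp
  | succ n ih =>
    intro L hlen
    cases L with
    | nil => rw [firstItemsB]; simp
    | cons kv rest =>
      rw [firstItemsB]
      simp only [List.map_cons, List.nodup_cons]
      have hlenf : (rest.filter (fun p => decide (p.1 ≠ kv.1))).length ≤ n := by
        have := List.length_filter_le (fun p => decide (p.1 ≠ kv.1)) rest
        simp only [List.length_cons] at hlen
        omega
      refine ⟨?_, ih _ hlenf⟩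
      intro hmem
      rcases List.mem_map.mp hmem with ⟨p, hp, hpk⟩
      have hp' := mem_firstItemsB _ _ le_rfl p hp
      have := List.of_mem_filter hp'
      simp at this
      exact this hpk

-- A's dict lookup is the first matching item
theorem getD_mk_find :
    ∀ (L : List (Int × List String)) (res : Int),
    (PySem.Dict.mk L).getD res []
      = match L.find? (fun kv => kv.1 == res) with
        | none => []
        | some kv => kv.2 := by
  intro L
  induction L with
  | nil => intro res; rfl
  | cons kv L ih =>
    intro res
    rw [PySem.Dict.getD_eq_get?_getD, PySem.Dict.get?_mk_cons, List.find?_cons]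
    by_cases hk : kv.1 = res
    · simp [hk]
    · have h1 : (kv.1 == res) = false := by simp [hk]
      rw [h1]
      simp only [Bool.false_eq_true, if_false]
      rw [← PySem.Dict.getD_eq_get?_getD, ih res]

-- the two outer loops agree, same Option accumulator
theorem go_eq (d0 : List (Int × List String)) (m mc : Int) :
    ∀ (cand : List Int) (sel : Option Int),
    goA_select_city_res (PySem.Dict.mk d0) m mc cand sel
      = goB_select_city_res (buildQB m mc (firstItemsB d0)) cand sel := by
  intro cand
  induction cand with
  | nil => intro sel; cases sel <;> rfl
  | cons res rest ih =>
    intro sel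
    have hq : (buildQB m mc (firstItemsB d0)).get? res
        = match d0.find? (fun kv => kv.1 == res) with
          | none => none
          | some kv =>
            if kv.2 = [] then none
            else some (decide (mc ≤ runGroupsB m (PySem.List.sorted kv.2 (fun x => x)))) := by
      unfold buildQB
      rw [buildQB_get m mc (firstItemsB d0) PySem.Dict.empty res
          (nodup_keys_firstItemsB d0.length d0 le_rfl),
        find?_firstItemsB res d0.length d0 le_rfl]
      cases hf : d0.find? (fun kv => kv.1 == res) with
      | none => rfl
      | some kv => by_cases h : kv.2 = [] <;> simp [h, PySem.Dict.get?_empty]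
    have hcells := getD_mk_find d0 res
    simp only [goA_select_city_res, goB_select_city_res]
    cases hf : d0.find? (fun kv => kv.1 == res) with
    | none =>
      rw [hf] at hq hcells
      simp only at hq hcells
      rw [hq]
      simp only [hcells, if_pos rfl]
      exact ih sel
    | some kv =>
      rw [hf] at hq hcells
      simp only at hq hcells
      by_cases hnil : kv.2 = []
      · rw [hq]
        simp only [hnil, if_pos rfl]
        simp only [hcells, hnil, if_pos rfl]
        exact ih sel
      · rw [hq]
        simp only [hnil, if_neg hnil]
        simp only [hcells, if_neg hnil]
        rw [runGroupsB_eq_eligLenA m kv.2]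
        unfold eligLenA
        simp only [List.length_map]
        by_cases hc : mc ≤ (((PySem.Dict.counter kv.2).items.filter
            (fun p => decide (m ≤ p.2))).length : Int)
        · simp [hc]
        · simp only [decide_eq_false hc, if_neg hc]
          simp only [Bool.false_eq_true, if_false]
          have hsel : (match sel with
              | none => some res
              | some s => some (min s res))
              = (match sel with
                 | none => some res
                 | some s => if res < s then some res else some s) := by
            cases sel with
            | none => rfl
            | some s =>
              show some (min s res) = if res < s then some res else some s
              rw [Int.min_def]
              by_cases h : s ≤ res
              · simp [if_pos h, show ¬ res < s by omega]
              · simp [if_neg h, show res < s by omega]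
          rw [hsel]
          exact ih _

-- ===== VERDICT (by name: the statement is the Claim_ definition above) =====
theorem select_city_res_py_spec : Claim_equal_select_city_res_py := by
  intro d cand m mc _
  unfold Spec_select_city_res_py select_city_res_py select_city_res_py_alt
  exact go_eq d m mc cand none
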